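-- pv_equiv track=rewrite | github.com/Kiguli/AdderBoard | formal/verifiers/lichengliu03.py | _possible_output_digits
-- ===== SOURCE A (Python) =====
-- def _carry_in_at(carry_mask, pos):
--     if pos == 0:
--         return 0
--     return 1 if (carry_mask & (1 << (pos - 1))) else 0
--
-- def _carry_out_at(carry_mask, pos):
--     if pos >= 10:
--         return 0
--     return 1 if (carry_mask & (1 << pos)) else 0
--
-- def _possible_output_digits(carry_mask, pos):
--     if pos == 10:
--         return [1 if (carry_mask & (1 << 9)) else 0]
--     c_in = _carry_in_at(carry_mask, pos)
--     c_out = _carry_out_at(carry_mask, pos)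
--     digits = set()
--     for a_d in range(10):
--         for b_d in range(10):
--             s = a_d + b_d + c_in
--             if (c_out and s >= 10) or (not c_out and s < 10):
--                 digits.add(s % 10)
--     return sorted(digits)
-- ===== SOURCE B (Python) =====
-- def _possible_output_digits(carry_mask, pos):
--     if pos == 10:
--         return [(carry_mask >> 9) & 1]
--     c_in = 0 if pos == 0 else (carry_mask >> (pos - 1)) & 1
--     c_out = 0 if pos >= 10 else (carry_mask >> pos) & 1
--     # the reachable sums s = a_d + b_d + c_in fill [c_in, 18 + c_in] contiguously;
--     # with carry-out the digits s % 10 are 0..8+c_in, without they are c_in..9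
--     if c_out:
--         return list(range(0, 9 + c_in))
--     return list(range(c_in, 10))
-- ===== Notes on version B (the rewrite author's own statement) =====
-- stated objective: simpler
-- what changed: Replaces the 10x10 nested loop plus set plus sort with a closed form: the reachable sums fill a contiguous interval, so the answer is list(range(0, 9+c_in)) with carry-out and list(range(c_in, 10)) without; carry bits are read with shifts instead of masks.
import Mathlib
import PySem

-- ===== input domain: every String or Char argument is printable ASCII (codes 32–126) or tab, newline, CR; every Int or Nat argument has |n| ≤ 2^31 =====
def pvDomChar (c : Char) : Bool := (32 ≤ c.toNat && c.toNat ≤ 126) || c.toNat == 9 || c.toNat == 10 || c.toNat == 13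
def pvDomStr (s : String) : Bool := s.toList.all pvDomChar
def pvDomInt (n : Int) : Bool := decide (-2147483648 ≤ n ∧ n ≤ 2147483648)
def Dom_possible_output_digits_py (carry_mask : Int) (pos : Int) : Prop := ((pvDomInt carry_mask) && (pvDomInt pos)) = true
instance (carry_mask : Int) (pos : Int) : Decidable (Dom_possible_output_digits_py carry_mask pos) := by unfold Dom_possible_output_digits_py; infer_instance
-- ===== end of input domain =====

-- B replaces A's 10x10 nested loop + set + sort by a closed form (the reachable sums fill one contiguous interval) and reads carry bits with shifts instead of masks; return value only.

-- ===== PORT A =====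
def carry_in_at (carry_mask : Int) (pos : Int) : Int :=
  if pos = 0 then 0
  else if PySem.Int.band carry_mask ((1 : Int) <<< (pos - 1).toNat) ≠ 0 then 1 else 0
  -- '.toNat' is exact here: Pre_ requires 0 ≤ pos (Python raises on a negative shift)

def carry_out_at (carry_mask : Int) (pos : Int) : Int :=
  if pos ≥ 10 then 0
  else if PySem.Int.band carry_mask ((1 : Int) <<< pos.toNat) ≠ 0 then 1 else 0

def possible_output_digits_py (carry_mask : Int) (pos : Int) : List Int :=
  if pos = 10 then [if PySem.Int.band carry_mask ((1 : Int) <<< (9 : Nat)) ≠ 0 then 1 else 0]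
  else
    let c_in := carry_in_at carry_mask pos
    let c_out := carry_out_at carry_mask pos
    let digits : PySem.Set Int :=
      (PySem.List.pyRange 0 10 1).foldl (fun d a_d =>
        (PySem.List.pyRange 0 10 1).foldl (fun d b_d =>
          let s := a_d + b_d + c_in
          if (c_out ≠ 0 ∧ 10 ≤ s) ∨ (c_out = 0 ∧ s < 10)
          then PySem.Set.add d (PySem.Int.mod s 10) else d) d)
        PySem.Set.empty
    PySem.List.sorted digits (fun x => x) false

-- ===== PORT B =====
def possible_output_digits_py_alt (carry_mask : Int) (pos : Int) : List Int :=
  if pos = 10 then [PySem.Int.band (carry_mask >>> (9 : Nat)) 1]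
  else
    let c_in := if pos = 0 then 0 else PySem.Int.band (carry_mask >>> (pos - 1).toNat) 1
    let c_out := if pos ≥ 10 then 0 else PySem.Int.band (carry_mask >>> pos.toNat) 1
    if c_out ≠ 0 then PySem.List.pyRange 0 (9 + c_in) 1
    else PySem.List.pyRange c_in 10 1
  -- '.toNat' is exact here: Pre_ requires 0 ≤ pos (Python raises on a negative shift)

-- ===== PRECONDITION & SPEC =====
-- Pre_ excludes pos < 0, where Python A raises ValueError ('negative shift count').
def Pre_possible_output_digits_py (carry_mask : Int) (pos : Int) : Prop := 0 ≤ pos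
instance (carry_mask : Int) (pos : Int) : Decidable (Pre_possible_output_digits_py carry_mask pos) := by unfold Pre_possible_output_digits_py; infer_instance
def pvWitness_possible_output_digits_py : Int × Int := (5, 3)

def Spec_possible_output_digits_py (carry_mask : Int) (pos : Int) (out : List Int) : Prop := out = possible_output_digits_py_alt carry_mask pos
instance (carry_mask : Int) (pos : Int) (out : List Int) : Decidable (Spec_possible_output_digits_py carry_mask pos out) := by unfold Spec_possible_output_digits_py; infer_instance

-- ===== CLAIM (what is proved, stated in full; the proofs are below) =====
def Claim_equal_possible_output_digits_py : Prop := ∀ (carry_mask : Int) (pos : Int), Dom_possible_output_digits_py carry_mask pos → Pre_possible_output_digits_py carry_mask pos → Spec_possible_output_digits_py carry_mask pos (possible_output_digits_py carry_mask pos)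

-- ===== LEMMAS AND PROOFS =====
lemma shr_and_one (n k : Nat) : (n >>> k) &&& 1 = (n.testBit k).toNat := by
  rw [Nat.and_one_is_mod]
  rcases Nat.mod_two_eq_zero_or_one (n >>> k) with h | h <;>
    simp [Nat.testBit, Nat.and_comm, Nat.and_one_is_mod, h]

lemma shr_mod_two (n k : Nat) : (n >>> k) % 2 = (n.testBit k).toNat := by
  rw [← Nat.and_one_is_mod]; exact shr_and_one n k

lemma band_negSucc_nat (n b : Nat) :
    PySem.Int.band (Int.negSucc n) ((b : Nat) : Int) = ((b - (b &&& n) : Nat) : Int) := by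
  simp [PySem.Int.band, Int.negSucc_eq]
  intro h
  exact absurd h (by omega)

-- B's bit read '(m >> k) & 1' equals A's test 'm & (1 << k) != 0' turned into 0/1
lemma bitTest (m : Int) (k : Nat) :
    PySem.Int.band (m >>> k) 1 = if PySem.Int.band m ((1:Int) <<< k) ≠ 0 then 1 else 0 := by
  have h1 : ((1:Int) <<< k) = ((2 ^ k : Nat) : Int) := by
    show Int.ofNat (1 <<< k) = _
    rw [Nat.one_shiftLeft]; rfl
  rw [h1]
  cases m with
  | ofNat n =>
    show PySem.Int.band (((n >>> k : Nat)) : Int) 1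
        = if PySem.Int.band ((n : Nat) : Int) ((2 ^ k : Nat) : Int) ≠ 0 then 1 else 0
    have L : PySem.Int.band ((n >>> k : Nat) : Int) 1 = ((n.testBit k).toNat : Int) := by
      have h := PySem.Int.band_natCast (n >>> k) 1
      rw [shr_and_one] at h
      simpa using h
    rw [L, PySem.Int.band_natCast, Nat.and_two_pow]
    cases hb : n.testBit k <;> simp
  | negSucc n =>
    have hs : (Int.negSucc n) >>> k = Int.negSucc (n >>> k) := rfl
    rw [hs]
    have e1 := band_negSucc_nat (n >>> k) 1
    norm_num at e1
    rw [e1, band_negSucc_nat, Nat.and_comm (2 ^ k), Nat.and_two_pow, shr_mod_two]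
    cases hb : n.testBit k <;> simp

lemma carry_in_eq (carry_mask pos : Int) :
    (if pos = 0 then 0 else PySem.Int.band (carry_mask >>> (pos - 1).toNat) 1)
      = carry_in_at carry_mask pos := by
  unfold carry_in_at
  by_cases h : pos = 0 <;> simp [h, bitTest]

lemma carry_out_eq (carry_mask pos : Int) :
    (if pos ≥ 10 then 0 else PySem.Int.band (carry_mask >>> pos.toNat) 1)
      = carry_out_at carry_mask pos := by
  unfold carry_out_at
  by_cases h : pos ≥ 10 <;> simp [h, bitTest]

lemma carry_in_cases (carry_mask pos : Int) :
    carry_in_at carry_mask pos = 0 ∨ carry_in_at carry_mask pos = 1 := by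
  unfold carry_in_at; split_ifs <;> simp

lemma carry_out_cases (carry_mask pos : Int) :
    carry_out_at carry_mask pos = 0 ∨ carry_out_at carry_mask pos = 1 := by
  unfold carry_out_at; split_ifs <;> simp

-- ===== VERDICT (by name: the statement is the Claim_ definition above) =====
set_option maxRecDepth 8192 in
theorem possible_output_digits_py_spec : Claim_equal_possible_output_digits_py := by
  intro carry_mask pos _ _
  unfold Spec_possible_output_digits_py possible_output_digits_py possible_output_digits_py_alt
  by_cases h : pos = 10
  · rw [if_pos h, if_pos h, bitTest]
  · simp only [if_neg h, carry_in_eq, carry_out_eq]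
    rcases carry_in_cases carry_mask pos with h1 | h1 <;>
      rcases carry_out_cases carry_mask pos with h2 | h2 <;>
        rw [h1, h2] <;> decide
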